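-- pv_equiv track=rewrite | github.com/Qenszu/Algorithms-and-Data-Structures | egzamin/termin_1/Egz1B/egz1B_Czarek.py | critical
-- ===== SOURCE A (Python) =====
-- def construct_graph(V,E):
--     graph = [[] for _ in range(V)]
--     for a,b in E:
--         graph[a].append(b)
--     return graph
--
-- def critical(V, E):
--     graph = construct_graph(V, E)
--     counter = 0
--
--     for a in range(V):
--         visited = [False] * V
--         parent_count = [0] * V
--
--         def dfs(v):
--             visited[v] = True
--             for u in graph[v]:
--                 if not visited[u]:
--                     parent_count[u] += 1
--                     dfs(u)
--                 else:
--                     parent_count[u] += 1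
--
--         dfs(a)
--
--         for b in graph[a]:
--             if visited[b] and parent_count[b] == 1:
--                 counter += 1
--
--     return counter
-- ===== SOURCE B (Python) =====
-- def critical(V, E):
--     adj = [[] for _ in range(V)]
--     for u, v in E:
--         adj[u].append(v)
--     total = 0
--     for a in range(V):
--         # phase 1: reachable set from a, iterative worklist
--         reach = {a}
--         stack = [a]
--         while stack:
--             v = stack.pop()
--             for u in adj[v]:
--                 if u not in reach:
--                     reach.add(u)
--                     stack.append(u)
--         # phase 2: in-degree from the reachable set, one scan of E
--         indeg = {}
--         for u, v in E:
--             if u in reach: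
--                 indeg[v] = indeg.get(v, 0) + 1
--         # phase 3: count a's out-edges whose target has exactly one such parent
--         for b in adj[a]:
--             if indeg.get(b, 0) == 1:
--                 total += 1
--     return total
-- ===== Notes on version B (the rewrite author's own statement) =====
-- stated objective: alternative
-- what changed: Replaces the per-source recursive DFS that interleaves visiting with parent counting by three separate phases per source: an iterative worklist reachability pass, a single scan of E counting in-edges from the reachable set, and a scan of a's out-edges.
-- outside the precondition, e.g. on critical(2, [(-1, 0)]): A returns 1, B returns 0
import Mathlib
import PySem

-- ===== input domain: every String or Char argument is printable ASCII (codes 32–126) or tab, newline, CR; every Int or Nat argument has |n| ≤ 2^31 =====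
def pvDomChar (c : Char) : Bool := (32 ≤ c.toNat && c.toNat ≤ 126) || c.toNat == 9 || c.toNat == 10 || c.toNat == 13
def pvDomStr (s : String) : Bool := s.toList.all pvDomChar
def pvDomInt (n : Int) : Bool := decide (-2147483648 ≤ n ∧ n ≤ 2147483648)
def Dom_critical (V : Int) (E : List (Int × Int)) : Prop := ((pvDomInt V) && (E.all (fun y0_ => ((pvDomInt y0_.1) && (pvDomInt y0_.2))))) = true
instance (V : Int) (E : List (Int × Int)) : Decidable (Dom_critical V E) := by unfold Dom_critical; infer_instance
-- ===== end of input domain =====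

-- B re-decomposes A's single recursive counting DFS into three per-source phases (iterative
-- worklist reachability, one in-degree scan of E, one scan of a's out-edges); same return value on Pre_.

-- ===== PORT A =====
-- graph[a].append(b): read graph[a], write it back with b appended (Python index semantics via PySem)
def pyAppendAt (g : List (List Int)) (i b : Int) : List (List Int) :=
  PySem.List.pySetD g i (PySem.List.pyGetD g i [] ++ [b])

def constructGraph (V : Int) (E : List (Int × Int)) : List (List Int) :=
  E.foldl (fun g e => pyAppendAt g e.1 e.2) (List.replicate V.toNat [])

-- the recursive dfs, carrying (visited, parent_count); fuel is a totality guard only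
mutual
def dfsA (G : List (List Int)) : Nat → Int → List Bool × List Int → List Bool × List Int
  | 0, _, st => st
  | f+1, v, st => dfsFold G f (PySem.List.pyGetD G v []) (PySem.List.pySetD st.1 v true, st.2)
termination_by f v st => (f, 0)

-- the 'for u in graph[v]' loop of dfs
def dfsFold (G : List (List Int)) (f : Nat) : List Int → List Bool × List Int → List Bool × List Int
  | [], st => st
  | u :: L, st =>
    let pc' := PySem.List.pySetD st.2 u (PySem.List.pyGetD st.2 u 0 + 1)
    if PySem.List.pyGetD st.1 u false = false then dfsFold G f L (dfsA G f u (st.1, pc'))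
    else dfsFold G f L (st.1, pc')
termination_by L st => (f, L.length + 1)
end

def critical (V : Int) (E : List (Int × Int)) : Int :=
  let graph := constructGraph V E
  (PySem.List.pyRange 0 V 1).foldl (fun counter a =>
    let st := dfsA graph V.toNat a (List.replicate V.toNat false, List.replicate V.toNat (0 : Int))
    (PySem.List.pyGetD graph a []).foldl (fun counter b =>
      if PySem.List.pyGetD st.1 b false = true ∧ PySem.List.pyGetD st.2 b 0 = 1 then counter + 1
      else counter) counter) 0

-- ===== PORT B =====
-- 'for u in adj[v]: if u not in reach: reach.add(u); stack.append(u)'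
def pushAll : List Int → PySem.Set Int × List Int → PySem.Set Int × List Int
  | [], st => st
  | u :: L, st =>
    if PySem.Set.contains st.1 u = false then pushAll L (PySem.Set.add st.1 u, st.2 ++ [u])
    else pushAll L st

-- 'while stack: v = stack.pop(); …'; fuel is a totality guard only
def reachLoop (adj : List (List Int)) : Nat → PySem.Set Int × List Int → PySem.Set Int
  | 0, st => st.1
  | f+1, st =>
    match st.2.getLast? with
    | none => st.1
    | some v => reachLoop adj f (pushAll (PySem.List.pyGetD adj v []) (st.1, st.2.dropLast))

def critical_alt (V : Int) (E : List (Int × Int)) : Int :=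
  let adj := constructGraph V E
  (PySem.List.pyRange 0 V 1).foldl (fun total a =>
    let reach := reachLoop adj (V.toNat + 1) (PySem.Set.ofList [a], [a])
    let indeg := E.foldl (fun d e =>
        if PySem.Set.contains reach e.1 = true then
          PySem.Dict.insert d e.2 (PySem.Dict.getD d e.2 0 + 1) else d)
      (PySem.Dict.empty : PySem.Dict Int Int)
    (PySem.List.pyGetD adj a []).foldl (fun total b =>
      if PySem.Dict.getD indeg b 0 = 1 then total + 1 else total) total) 0

-- ===== PRECONDITION & SPEC =====
-- Pre_ restricts to the function's natural domain: every edge endpoint is a vertex label in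
-- range(V).  Outside it A's list indexing either raises IndexError or wraps negative labels
-- around (returning a value B does not reproduce).
def Pre_critical (V : Int) (E : List (Int × Int)) : Prop :=
  ∀ e ∈ E, 0 ≤ e.1 ∧ e.1 < V ∧ 0 ≤ e.2 ∧ e.2 < V
instance (V : Int) (E : List (Int × Int)) : Decidable (Pre_critical V E) := by
  unfold Pre_critical; infer_instance
def pvWitness_critical : Int × (List (Int × Int)) := (3, [(0, 1), (1, 2), (2, 1), (0, 0)])

def Spec_critical (V : Int) (E : List (Int × Int)) (out : Int) : Prop := out = critical_alt V E
instance (V : Int) (E : List (Int × Int)) (out : Int) : Decidable (Spec_critical V E out) := by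
  unfold Spec_critical; infer_instance

-- ===== CLAIM (what is proved, stated in full; the proofs are below) =====
def Claim_equal_critical : Prop := ∀ (V : Int) (E : List (Int × Int)), Dom_critical V E → Pre_critical V E → Spec_critical V E (critical V E)

-- ===== LEMMAS AND PROOFS =====

-- the edge relation read off the adjacency structure (reachability = its ReflTransGen)
def RelG (G : List (List Int)) (x y : Int) : Prop := y ∈ G.getD x.toNat []

-- sum, over the newly visited vertices, of the multiplicity of i as an out-neighbour
def newSum (G : List (List Int)) (n : Nat) (vis vis' : List Bool) (i : Nat) : Int :=
  ∑ w ∈ Finset.range n,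
    (if vis'.getD w false = true ∧ vis.getD w false = false
     then ((G.getD w []).count ((i : Int)) : Int) else 0)

-- pointwise monotonicity of visited lists
def VisLe (vis vis' : List Bool) : Prop :=
  ∀ i : Nat, vis.getD i false = true → vis'.getD i false = true

theorem getD_set' {α : Type} (xs : List α) (i j : Nat) (v d : α) :
    (xs.set i v).getD j d = if i = j ∧ i < xs.length then v else xs.getD j d := by
  simp only [List.getD_eq_getElem?_getD, List.getElem?_set]
  split_ifs with h1 <;> simp_all <;> omega

theorem count_false_mono (xs : List Bool) : ∀ (ys : List Bool), xs.length = ys.length →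
    VisLe xs ys → ys.count false ≤ xs.count false := by
  induction xs with
  | nil => intro ys hl _; cases ys <;> simp_all
  | cons x xs ih =>
    intro ys hl h
    cases ys with
    | nil => simp at hl
    | cons y ys =>
      have h0 := h 0
      have htail : VisLe xs ys := by
        intro i hi
        have := h (i + 1)
        simpa using this (by simpa using hi)
      have hle := ih ys (by simpa using hl) htail
      simp only [List.getD_cons_zero] at h0
      cases x <;> cases y
      · simp [List.count_cons]; omega
      · simp [List.count_cons]; omega
      · exact absurd (h0 rfl) (by simp)
      · simp [List.count_cons]; omega

theorem count_false_set (xs : List Bool) : ∀ (k : Nat), k < xs.length →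
    xs.getD k false = false → (xs.set k true).count false + 1 = xs.count false := by
  induction xs with
  | nil => intro k hk; simp at hk
  | cons x xs ih =>
    intro k hk hx
    cases k with
    | zero => simp_all [List.count_cons]
    | succ k =>
      simp only [List.length_cons] at hk
      simp only [List.getD_cons_succ] at hx
      have := ih k (by omega) hx
      simp [List.count_cons]
      omega

theorem count_false_pos (xs : List Bool) (k : Nat) (hk : k < xs.length)
    (hx : xs.getD k false = false) : 0 < xs.count false := by
  have : xs.getD k false = xs[k] := List.getD_eq_getElem xs false hk
  rw [List.count_pos_iff]
  rw [this] at hx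
  exact hx ▸ List.getElem_mem hk

theorem length_le_of_nodup_range (n : Nat) (xs : List Int) (h1 : xs.Nodup)
    (h2 : ∀ x ∈ xs, 0 ≤ x ∧ x.toNat < n) : xs.length ≤ n := by
  classical
  have hcard : xs.toFinset.card = xs.length := List.toFinset_card_of_nodup h1
  have hsub : xs.toFinset ⊆ (Finset.range n).image (fun k : Nat => (k : Int)) := by
    intro x hx
    rw [List.mem_toFinset] at hx
    obtain ⟨hx0, hxn⟩ := h2 x hx
    refine Finset.mem_image.mpr ⟨x.toNat, Finset.mem_range.mpr hxn, ?_⟩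
    omega
  have := Finset.card_le_card hsub
  have himg : ((Finset.range n).image (fun k : Nat => (k : Int))).card ≤ n := by
    calc ((Finset.range n).image (fun k : Nat => (k : Int))).card ≤ (Finset.range n).card :=
      Finset.card_image_le
    _ = n := Finset.card_range n
  omega

theorem newSum_trans (G : List (List Int)) (n : Nat) (v1 v2 v3 : List Bool) (i : Nat)
    (h12 : VisLe v1 v2) (h23 : VisLe v2 v3) :
    newSum G n v1 v3 i = newSum G n v1 v2 i + newSum G n v2 v3 i := by
  unfold newSum
  rw [← Finset.sum_add_distrib]
  apply Finset.sum_congr rfl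
  intro w _
  have a12 := h12 w
  have a23 := h23 w
  cases hb1 : v1.getD w false <;> cases hb2 : v2.getD w false <;>
    cases hb3 : v3.getD w false <;> simp_all

theorem foldl_eq_of_agree (L : List Int) (f g : Int → Int → Int)
    (h : ∀ c : Int, ∀ a ∈ L, f c a = g c a) : ∀ c : Int, L.foldl f c = L.foldl g c := by
  induction L with
  | nil => intro c; simp
  | cons a L ih =>
    intro c
    simp only [List.foldl_cons]
    rw [h c a (by simp)]
    exact ih (fun c b hb => h c b (by simp [hb])) (g c a)

theorem pyGetD_int {α : Type} (xs : List α) (i : Int) (d : α) (h : 0 ≤ i) :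
    PySem.List.pyGetD xs i d = xs.getD i.toNat d := by
  conv_lhs => rw [← Int.toNat_of_nonneg h]
  rw [PySem.List.pyGetD_natCast]

theorem pyAppendAt_eq (g : List (List Int)) (i b : Int) (h0 : 0 ≤ i) :
    pyAppendAt g i b = g.set i.toNat (g.getD i.toNat [] ++ [b]) := by
  unfold pyAppendAt
  rw [PySem.List.pySetD_of_nonneg _ _ h0, pyGetD_int _ _ _ h0]

theorem cg_fold (E : List (Int × Int)) :
    ∀ g : List (List Int), (∀ e ∈ E, 0 ≤ e.1 ∧ e.1.toNat < g.length) →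
    (E.foldl (fun g e => pyAppendAt g e.1 e.2) g).length = g.length ∧
    ∀ k : Nat, (E.foldl (fun g e => pyAppendAt g e.1 e.2) g).getD k [] =
      g.getD k [] ++ (E.filter (fun e => decide (e.1 = (k : Int)))).map (·.2) := by
  induction E with
  | nil => intro g _; simp
  | cons e E ih =>
    intro g hg
    obtain ⟨he0, hel⟩ := hg e (by simp)
    have hg' : ∀ e' ∈ E, 0 ≤ e'.1 ∧ e'.1.toNat < (pyAppendAt g e.1 e.2).length := by
      intro e' he'
      obtain ⟨h1, h2⟩ := hg e' (by simp [he'])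
      refine ⟨h1, ?_⟩
      rw [pyAppendAt_eq _ _ _ he0, List.length_set]
      exact h2
    obtain ⟨ihl, ihd⟩ := ih (pyAppendAt g e.1 e.2) hg'
    constructor
    · rw [List.foldl_cons, ihl, pyAppendAt_eq _ _ _ he0, List.length_set]
    · intro k
      rw [List.foldl_cons, ihd k, pyAppendAt_eq _ _ _ he0, getD_set']
      by_cases hk : e.1.toNat = k
      · subst hk
        have hek : e.1 = ((e.1.toNat : Nat) : Int) := by omega
        rw [if_pos ⟨rfl, hel⟩]
        simp [List.filter_cons, ← hek, List.append_assoc]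
      · have hek : ¬ (e.1 = (k : Int)) := by omega
        rw [if_neg (by tauto)]
        simp [List.filter_cons, hek]

theorem getD_replicate' {α : Type} (n k : Nat) (a d : α) :
    (List.replicate n a).getD k d = if k < n then a else d := by
  simp only [List.getD_eq_getElem?_getD, List.getElem?_replicate]
  split_ifs <;> simp

theorem cg_spec (V : Int) (E : List (Int × Int)) (hE : Pre_critical V E) :
    (constructGraph V E).length = V.toNat ∧
    ∀ k : Nat, (constructGraph V E).getD k [] =
      (E.filter (fun e => decide (e.1 = (k : Int)))).map (·.2) := by
  have hg : ∀ e ∈ E, 0 ≤ e.1 ∧ e.1.toNat < (List.replicate V.toNat ([] : List Int)).length := by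
    intro e he
    obtain ⟨h1, h2, _, _⟩ := hE e he
    simp only [List.length_replicate]
    exact ⟨h1, by omega⟩
  obtain ⟨hl, hd⟩ := cg_fold E (List.replicate V.toNat []) hg
  unfold constructGraph
  refine ⟨by simpa using hl, fun k => ?_⟩
  rw [hd k, getD_replicate']
  by_cases hk : k < V.toNat
  · simp [hk]
  · simp only [hk, if_false, List.nil_append]

theorem cg_range (V : Int) (E : List (Int × Int)) (hE : Pre_critical V E) :
    ∀ (w : Nat) (u : Int), u ∈ (constructGraph V E).getD w [] → 0 ≤ u ∧ u.toNat < V.toNat := by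
  intro w u hu
  rw [(cg_spec V E hE).2 w] at hu
  obtain ⟨e, he, rfl⟩ := List.mem_map.mp hu
  have := List.mem_filter.mp he
  obtain ⟨_, _, h3, h4⟩ := hE e this.1
  exact ⟨h3, by omega⟩

theorem newSum_single (G : List (List Int)) (n : Nat) (vis : List Bool) (k : Nat)
    (hk : k < n) (hkl : k < vis.length) (hvf : vis.getD k false = false) (i : Nat) :
    newSum G n vis (vis.set k true) i = ((G.getD k []).count ((i : Int)) : Int) := by
  unfold newSum
  rw [Finset.sum_eq_single k]
  · have hcond : ((vis.set k true).getD k false = true ∧ vis.getD k false = false) := by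
      rw [getD_set', if_pos ⟨rfl, hkl⟩]
      exact ⟨rfl, hvf⟩
    rw [if_pos hcond]
  · intro w _ hw
    have hcond : (vis.set k true).getD w false = vis.getD w false := by
      rw [getD_set', if_neg (by intro hcon; exact hw hcon.1.symm)]
    rw [hcond]
    cases h : vis.getD w false <;> simp [h]
  · intro hcon
    exact absurd (Finset.mem_range.mpr hk) hcon

def DfsPost (G : List (List Int)) (n : Nat) (v : Int) (vis : List Bool) (pc : List Int)
    (res : List Bool × List Int) : Prop :=
  res.1.length = n ∧ res.2.length = n ∧ VisLe vis res.1 ∧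
  res.1.getD v.toNat false = true ∧
  (∀ i : Nat, res.1.getD i false = true →
      vis.getD i false = true ∨ Relation.ReflTransGen (RelG G) v (i : Int)) ∧
  (∀ i : Nat, res.1.getD i false = true → vis.getD i false = false →
      ∀ u ∈ G.getD i [], res.1.getD u.toNat false = true) ∧
  (∀ i : Nat, i < n → res.2.getD i 0 = pc.getD i 0 + newSum G n vis res.1 i)

def FoldPost (G : List (List Int)) (n : Nat) (v : Int) (L : List Int) (vis : List Bool)
    (pc : List Int) (res : List Bool × List Int) : Prop :=
  res.1.length = n ∧ res.2.length = n ∧ VisLe vis res.1 ∧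
  (∀ u ∈ L, res.1.getD u.toNat false = true) ∧
  (∀ i : Nat, res.1.getD i false = true →
      vis.getD i false = true ∨ Relation.ReflTransGen (RelG G) v (i : Int)) ∧
  (∀ i : Nat, res.1.getD i false = true → vis.getD i false = false →
      ∀ u ∈ G.getD i [], res.1.getD u.toNat false = true) ∧
  (∀ i : Nat, i < n → res.2.getD i 0 = pc.getD i 0 + (L.count (i : Int) : Int) + newSum G n vis res.1 i)

theorem dfsFold_spec (G : List (List Int)) (n : Nat)
    (hG : ∀ (w : Nat) (u : Int), u ∈ G.getD w [] → 0 ≤ u ∧ u.toNat < n) (f : Nat)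
    (IH : ∀ (v : Int) (vis : List Bool) (pc : List Int),
      vis.length = n → pc.length = n → 0 ≤ v → v.toNat < n →
      vis.getD v.toNat false = false → vis.count false ≤ f →
      DfsPost G n v vis pc (dfsA G f v (vis, pc))) :
    ∀ (L : List Int) (v : Int), (∀ u ∈ L, u ∈ G.getD v.toNat []) →
    ∀ (vis : List Bool) (pc : List Int), vis.length = n → pc.length = n →
    vis.count false ≤ f →
    FoldPost G n v L vis pc (dfsFold G f L (vis, pc)) := by
  intro L
  induction L with
  | nil =>
    intro v hL vis pc hlv hlp hcf
    rw [show dfsFold G f [] (vis, pc) = (vis, pc) by simp [dfsFold]]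
    refine ⟨hlv, hlp, fun i h => h, by simp, fun i h => Or.inl h, ?_, ?_⟩
    · intro i h1 h2; rw [h1] at h2; cases h2
    · intro i hi
      have hz : newSum G n vis vis i = 0 := by
        unfold newSum
        apply Finset.sum_eq_zero
        intro w _
        by_cases h : vis.getD w false = true
        · simp [h]
        · simp [h]
      simp [hz]
  | cons u L ih =>
    intro v hL vis pc hlv hlp hcf
    have hu : u ∈ G.getD v.toNat [] := hL u (by simp)
    obtain ⟨hu0, hun⟩ := hG v.toNat u hu
    have hL' : ∀ x ∈ L, x ∈ G.getD v.toNat [] := fun x hx => hL x (by simp [hx])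
    have hunfold : dfsFold G f (u :: L) (vis, pc) =
        if vis.getD u.toNat false = false
        then dfsFold G f L (dfsA G f u (vis, pc.set u.toNat (pc.getD u.toNat 0 + 1)))
        else dfsFold G f L (vis, pc.set u.toNat (pc.getD u.toNat 0 + 1)) := by
      simp only [dfsFold]
      rw [pyGetD_int _ _ _ hu0, pyGetD_int _ _ _ hu0,
        PySem.List.pySetD_of_nonneg _ _ hu0]
    set pc1 := pc.set u.toNat (pc.getD u.toNat 0 + 1) with hpc1
    have hlp1 : pc1.length = n := by rw [hpc1, List.length_set, hlp]
    have hpc1i : ∀ i : Nat, pc1.getD i 0 = if u.toNat = i then pc.getD i 0 + 1 else pc.getD i 0 := by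
      intro i
      rw [hpc1, getD_set']
      by_cases hui : u.toNat = i
      · rw [if_pos ⟨hui, by omega⟩, if_pos hui, hui]
      · rw [if_neg (by tauto), if_neg hui]
    have hcnt : ∀ i : Nat, (((u :: L).count (i : Int)) : Int)
        = ((L.count (i : Int)) : Int) + (if u.toNat = i then 1 else 0) := by
      intro i
      simp only [List.count_cons, beq_iff_eq]
      by_cases hui : u.toNat = i
      · rw [if_pos (by omega : u = (i : Int)), if_pos hui]
        push_cast; ring
      · rw [if_neg (by omega : ¬ (u = (i : Int))), if_neg hui]
        push_cast; ring
    by_cases hvu : vis.getD u.toNat false = false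
    · rw [hunfold, if_pos hvu]
      have D := IH u vis pc1 hlv hlp1 hu0 hun hvu hcf
      obtain ⟨d1, d2, d3, d4, d5, d6, d7⟩ := D
      set st1 := dfsA G f u (vis, pc1) with hst1
      have hcf1 : st1.1.count false ≤ f :=
        le_trans (count_false_mono vis st1.1 (by rw [hlv, d1]) d3) hcf
      obtain ⟨f1, f2, f3, f4, f5, f6, f7⟩ := ih v hL' st1.1 st1.2 d1 d2 hcf1
      rw [show (st1.1, st1.2) = st1 from rfl] at f1 f2 f3 f4 f5 f6 f7
      refine ⟨f1, f2, fun i h => f3 i (d3 i h), ?_, ?_, ?_, ?_⟩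
      · intro x hx
        rcases List.mem_cons.mp hx with rfl | hx'
        · exact f3 _ d4
        · exact f4 x hx'
      · intro i hi
        by_cases hsi : st1.1.getD i false = true
        · rcases d5 i hsi with h1 | h1
          · exact Or.inl h1
          · exact Or.inr (Relation.ReflTransGen.head (show RelG G v u from hu) h1)
        · rcases f5 i hi with h1 | h1
          · exact absurd h1 hsi
          · exact Or.inr h1
      · intro i hi hvi
        by_cases hsi : st1.1.getD i false = true
        · intro u' hu'
          exact f3 _ (d6 i hsi hvi u' hu')
        · have hsix : st1.1.getD i false = false := by
            cases h : st1.1.getD i false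
            · rfl
            · exact absurd h hsi
          exact f6 i hi hsix
      · intro i hin
        have e1 := f7 i hin
        have e2 := d7 i hin
        have e3 := hpc1i i
        have e4 := hcnt i
        have e5 := newSum_trans G n vis st1.1 (dfsFold G f L st1).1 i d3
          (fun j hj => f3 j hj)
        rw [e1, e2, e3, e5, e4]
        by_cases hui : u.toNat = i <;> simp [hui] <;> ring
    · have hvu' : vis.getD u.toNat false = true := by
        cases h : vis.getD u.toNat false
        · exact absurd h hvu
        · rfl
      rw [hunfold, if_neg hvu]
      obtain ⟨f1, f2, f3, f4, f5, f6, f7⟩ := ih v hL' vis pc1 hlv hlp1 hcf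
      refine ⟨f1, f2, f3, ?_, f5, f6, ?_⟩
      · intro x hx
        rcases List.mem_cons.mp hx with rfl | hx'
        · exact f3 _ hvu'
        · exact f4 x hx'
      · intro i hin
        have e1 := f7 i hin
        have e3 := hpc1i i
        have e4 := hcnt i
        rw [e1, e3, e4]
        by_cases hui : u.toNat = i <;> simp [hui] <;> ring

theorem dfsA_spec (G : List (List Int)) (n : Nat)
    (hG : ∀ (w : Nat) (u : Int), u ∈ G.getD w [] → 0 ≤ u ∧ u.toNat < n) :
    ∀ (fuel : Nat) (v : Int) (vis : List Bool) (pc : List Int),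
    vis.length = n → pc.length = n → 0 ≤ v → v.toNat < n →
    vis.getD v.toNat false = false → vis.count false ≤ fuel →
    DfsPost G n v vis pc (dfsA G fuel v (vis, pc)) := by
  intro fuel
  induction fuel with
  | zero =>
    intro v vis pc hlv hlp hv0 hvn hvf hcf
    have := count_false_pos vis v.toNat (by omega) hvf
    omega
  | succ f ihf =>
    intro v vis pc hlv hlp hv0 hvn hvf hcf
    have hunfold : dfsA G (f+1) v (vis, pc)
        = dfsFold G f (G.getD v.toNat []) (vis.set v.toNat true, pc) := by
      simp only [dfsA]
      rw [pyGetD_int _ _ _ hv0, PySem.List.pySetD_of_nonneg _ _ hv0]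
    rw [hunfold]
    set vis1 := vis.set v.toNat true with hvis1
    have hlv1 : vis1.length = n := by rw [hvis1, List.length_set, hlv]
    have hcf1 : vis1.count false ≤ f := by
      have hcs := count_false_set vis v.toNat (by omega) hvf
      rw [← hvis1] at hcs
      omega
    have hvle : VisLe vis vis1 := by
      intro i h
      rw [hvis1, getD_set']
      by_cases hvi : v.toNat = i
      · rw [if_pos ⟨hvi, by omega⟩]
      · rw [if_neg (by tauto)]; exact h
    have hv1v : vis1.getD v.toNat false = true := by
      rw [hvis1, getD_set', if_pos ⟨rfl, by omega⟩]
    have hv1ne : ∀ i : Nat, i ≠ v.toNat → vis1.getD i false = vis.getD i false := by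
      intro i hi
      rw [hvis1, getD_set', if_neg (by tauto)]
    obtain ⟨f1, f2, f3, f4, f5, f6, f7⟩ :=
      dfsFold_spec G n hG f ihf (G.getD v.toNat []) v (fun u hu => hu) vis1 pc hlv1 hlp hcf1
    refine ⟨f1, f2, fun i h => f3 i (hvle i h), f3 _ hv1v, ?_, ?_, ?_⟩
    · intro i hi
      by_cases hiv : i = v.toNat
      · right
        have : ((i : Nat) : Int) = v := by omega
        rw [this]
      · rcases f5 i hi with h1 | h1
        · left; rw [← hv1ne i hiv]; exact h1
        · right; exact h1
    · intro i hi hvi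
      by_cases hiv : i = v.toNat
      · subst hiv
        intro u hu
        exact f4 u hu
      · have : vis1.getD i false = false := by rw [hv1ne i hiv]; exact hvi
        exact f6 i hi this
    · intro i hin
      have e1 := f7 i hin
      have e5 := newSum_trans G n vis vis1 (dfsFold G f (G.getD v.toNat []) (vis1, pc)).1 i
        hvle (fun j hj => f3 j hj)
      have e6 := newSum_single G n vis v.toNat hvn (by omega) hvf i
      rw [← hvis1] at e6
      rw [e1, e5, e6]
      ring

theorem dfsA_full (G : List (List Int)) (n : Nat)
    (hG : ∀ (w : Nat) (u : Int), u ∈ G.getD w [] → 0 ≤ u ∧ u.toNat < n)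
    (a : Int) (ha0 : 0 ≤ a) (han : a.toNat < n) :
    (∀ i : Nat, (dfsA G n a (List.replicate n false, List.replicate n (0 : Int))).1.getD i false = true
        ↔ (i < n ∧ Relation.ReflTransGen (RelG G) a (i : Int))) ∧
    (∀ i : Nat, i < n → (dfsA G n a (List.replicate n false, List.replicate n (0 : Int))).2.getD i 0 =
      ∑ w ∈ Finset.range n,
        (if (dfsA G n a (List.replicate n false, List.replicate n (0 : Int))).1.getD w false = true
         then ((G.getD w []).count ((i : Int)) : Int) else 0)) := by
  have hrepl : ∀ i : Nat, (List.replicate n (false : Bool)).getD i false = false := by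
    intro i
    rw [getD_replicate']
    split_ifs <;> rfl
  obtain ⟨d1, d2, d3, d4, d5, d6, d7⟩ := dfsA_spec G n hG n a
    (List.replicate n false) (List.replicate n (0 : Int))
    (by simp) (by simp) ha0 han (hrepl a.toNat) (by simp)
  set st := dfsA G n a (List.replicate n false, List.replicate n (0 : Int)) with hst
  constructor
  · intro i
    constructor
    · intro hi
      have hin : i < n := by
        by_contra hcon
        have : st.1.getD i false = false := List.getD_eq_default _ _ (by omega)
        rw [this] at hi
        cases hi
      rcases d5 i hi with h1 | h1
      · rw [hrepl i] at h1; cases h1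
      · exact ⟨hin, h1⟩
    · rintro ⟨hin, hrt⟩
      -- closure induction: every reachable vertex is visited
      have key : ∀ w : Int, Relation.ReflTransGen (RelG G) a w → 0 ≤ w ∧ st.1.getD w.toNat false = true := by
        intro w hw
        induction hw with
        | refl => exact ⟨ha0, d4⟩
        | tail h1 h2 ih2 =>
          rename_i mid w'
          obtain ⟨hm0, hmv⟩ := ih2
          obtain ⟨hw0, hwn⟩ := hG mid.toNat w' h2
          exact ⟨hw0, d6 mid.toNat hmv (hrepl mid.toNat) w' h2⟩
      have := key (i : Int) hrt
      simpa using this.2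
  · intro i hin
    have e := d7 i hin
    rw [e]
    have hz : (List.replicate n (0 : Int)).getD i 0 = 0 := by
      rw [getD_replicate']
      split_ifs <;> rfl
    rw [hz]
    unfold newSum
    rw [zero_add]
    apply Finset.sum_congr rfl
    intro w _
    rw [hrepl w]
    simp

theorem pushAll_spec (L : List Int) :
    ∀ (reach : PySem.Set Int) (stack : List Int), reach.Nodup →
    (pushAll L (reach, stack)).1.Nodup ∧
    (∀ x : Int, x ∈ (pushAll L (reach, stack)).1 ↔ x ∈ reach ∨ x ∈ L) ∧
    (pushAll L (reach, stack)).1.length + stack.length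
      = reach.length + (pushAll L (reach, stack)).2.length ∧
    (∀ x ∈ (pushAll L (reach, stack)).2, x ∈ stack ∨ x ∈ (pushAll L (reach, stack)).1) ∧
    (∀ x ∈ (pushAll L (reach, stack)).1, x ∈ reach ∨ x ∈ (pushAll L (reach, stack)).2) ∧
    (∀ x ∈ stack, x ∈ (pushAll L (reach, stack)).2) ∧
    reach.length ≤ (pushAll L (reach, stack)).1.length := by
  induction L with
  | nil =>
    intro reach stack h
    exact ⟨h, fun x => by simp [pushAll], rfl, fun x hx => Or.inl hx, fun x hx => Or.inl hx,
      fun x hx => hx, le_refl _⟩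
  | cons u L ih =>
    intro reach stack h
    by_cases hc : u ∈ reach
    · rw [show pushAll (u :: L) (reach, stack) = pushAll L (reach, stack) by
        simp [pushAll, hc]]
      obtain ⟨n1, n2, n3, n4, n5, n6, n7⟩ := ih reach stack h
      refine ⟨n1, ?_, n3, n4, ?_, n6, n7⟩
      · intro x
        rw [n2 x]
        constructor
        · rintro (h1 | h1)
          · exact Or.inl h1
          · exact Or.inr (List.mem_cons_of_mem _ h1)
        · rintro (h1 | h1)
          · exact Or.inl h1
          · rcases List.mem_cons.mp h1 with rfl | h1
            · exact Or.inl hc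
            · exact Or.inr h1
      · intro x hx
        rcases n5 x hx with h1 | h1
        · exact Or.inl h1
        · exact Or.inr h1
    · have hadd : PySem.Set.add reach u = reach ++ [u] := PySem.Set.add_of_not_mem hc
      rw [show pushAll (u :: L) (reach, stack)
            = pushAll L (PySem.Set.add reach u, stack ++ [u]) by simp [pushAll, hc]]
      have hnd : (PySem.Set.add reach u).Nodup := by
        rw [hadd]
        exact List.Nodup.append h (List.nodup_singleton u)
          (by intro y hy hz; simp at hz; exact hc (hz ▸ hy))
      obtain ⟨n1, n2, n3, n4, n5, n6, n7⟩ := ih (PySem.Set.add reach u) (stack ++ [u]) hnd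
      have hlen : (PySem.Set.add reach u).length = reach.length + 1 := by simp [hadd]
      refine ⟨n1, ?_, ?_, ?_, ?_, ?_, ?_⟩
      · intro x
        rw [n2 x, hadd]
        simp only [List.mem_append, List.mem_singleton, List.mem_cons]
        tauto
      · rw [hlen] at n3
        simp only [List.length_append, List.length_singleton] at n3
        omega
      · intro y hy
        rcases n4 y hy with h1 | h1
        · rcases List.mem_append.mp h1 with h2 | h2
          · exact Or.inl h2
          · -- y = u, which is in the result set
            right
            rw [n2 y, hadd]
            simp only [List.mem_singleton] at h2
            rw [h2]
            simp
        · exact Or.inr h1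
      · intro y hy
        rcases n5 y hy with h1 | h1
        · rw [hadd] at h1
          rcases List.mem_append.mp h1 with h2 | h2
          · exact Or.inl h2
          · simp only [List.mem_singleton] at h2
            rw [h2]
            exact Or.inr (n6 u (by simp))
        · exact Or.inr h1
      · intro y hy
        exact n6 y (by simp [hy])
      · rw [hlen] at n7
        omega

theorem reachLoop_spec (adj : List (List Int)) (n : Nat)
    (hadj : ∀ (w : Nat) (u : Int), u ∈ adj.getD w [] → 0 ≤ u ∧ u.toNat < n) (a : Int) :
    ∀ (f : Nat) (reach : PySem.Set Int) (stack : List Int),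
    reach.Nodup → (∀ x ∈ reach, 0 ≤ x ∧ x.toNat < n) →
    (∀ x ∈ stack, x ∈ reach) →
    (∀ x ∈ reach, Relation.ReflTransGen (RelG adj) a x) → a ∈ reach →
    (∀ x ∈ reach, x ∈ stack ∨ ∀ u ∈ adj.getD x.toNat [], u ∈ reach) →
    stack.length + (n - reach.length) ≤ f →
    (∀ x ∈ reachLoop adj f (reach, stack),
        Relation.ReflTransGen (RelG adj) a x ∧ 0 ≤ x ∧ x.toNat < n) ∧
    (∀ x ∈ reach, x ∈ reachLoop adj f (reach, stack)) ∧
    (∀ x ∈ reachLoop adj f (reach, stack), ∀ u ∈ adj.getD x.toNat [], u ∈ reachLoop adj f (reach, stack)) := by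
  intro f
  induction f with
  | zero =>
    intro reach stack hnd hrange hss hsound ha hclose hm
    have hlen0 : stack.length = 0 := by omega
    have hst : stack = [] := List.length_eq_zero_iff.mp hlen0
    subst hst
    rw [show reachLoop adj 0 (reach, []) = reach from rfl]
    refine ⟨fun x hx => ⟨hsound x hx, hrange x hx⟩, fun x hx => hx, ?_⟩
    intro x hx u hu
    rcases hclose x hx with h1 | h1
    · simp at h1
    · exact h1 u hu
  | succ f ih =>
    intro reach stack hnd hrange hss hsound ha hclose hm
    cases hs : stack.getLast? with
    | none =>
      have hst : stack = [] := List.getLast?_eq_none_iff.mp hs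
      subst hst
      rw [show reachLoop adj (f+1) (reach, []) = reach from rfl]
      refine ⟨fun x hx => ⟨hsound x hx, hrange x hx⟩, fun x hx => hx, ?_⟩
      intro x hx u hu
      rcases hclose x hx with h1 | h1
      · simp at h1
      · exact h1 u hu
    | some v =>
      obtain ⟨st0, hst0⟩ := List.getLast?_eq_some_iff.mp hs
      have hvr : v ∈ reach := hss v (by rw [hst0]; simp)
      obtain ⟨hv0, hvn⟩ := hrange v hvr
      have hL : PySem.List.pyGetD adj v [] = adj.getD v.toNat [] := pyGetD_int _ _ _ hv0
      have hstep : reachLoop adj (f+1) (reach, stack)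
          = reachLoop adj f (pushAll (adj.getD v.toNat []) (reach, stack.dropLast)) := by
        simp only [reachLoop, hs, hL]
      obtain ⟨n1, n2, n3, n4, n5, n6, n7⟩ :=
        pushAll_spec (adj.getD v.toNat []) reach stack.dropLast hnd
      set res := pushAll (adj.getD v.toNat []) (reach, stack.dropLast) with hres
      have hrange' : ∀ x ∈ res.1, 0 ≤ x ∧ x.toNat < n := by
        intro x hx
        rcases (n2 x).mp hx with h1 | h1
        · exact hrange x h1
        · exact hadj v.toNat x h1
      have hss' : ∀ x ∈ res.2, x ∈ res.1 := by
        intro x hx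
        rcases n4 x hx with h1 | h1
        · refine (n2 x).mpr (Or.inl (hss x ?_))
          rw [hst0] at h1 ⊢
          simp only [List.dropLast_concat] at h1
          simp [h1]
        · exact h1
      have hsound' : ∀ x ∈ res.1, Relation.ReflTransGen (RelG adj) a x := by
        intro x hx
        rcases (n2 x).mp hx with h1 | h1
        · exact hsound x h1
        · exact Relation.ReflTransGen.tail (hsound v hvr) h1
      have ha' : a ∈ res.1 := (n2 a).mpr (Or.inl ha)
      have hclose' : ∀ x ∈ res.1, x ∈ res.2 ∨ ∀ u ∈ adj.getD x.toNat [], u ∈ res.1 := by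
        intro x hx
        rcases n5 x hx with h1 | h1
        · -- x was already in reach
          rcases hclose x h1 with h2 | h2
          · -- x was on the stack
            rw [hst0] at h2
            rcases List.mem_append.mp h2 with h3 | h3
            · refine Or.inl (n6 x ?_)
              rw [hst0]
              simpa using h3
            · simp only [List.mem_singleton] at h3
              subst h3
              exact Or.inr (fun u hu => (n2 u).mpr (Or.inr hu))
          · exact Or.inr (fun u hu => (n2 u).mpr (Or.inl (h2 u hu)))
        · exact Or.inl h1
    -- measure
      have hr1n : res.1.length ≤ n := length_le_of_nodup_range n res.1 n1 hrange'
      have hmeas : res.2.length + (n - res.1.length) ≤ f := by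
        have hsl : stack.length = stack.dropLast.length + 1 := by
          rw [hst0]; simp
        omega
      obtain ⟨c1, c2, c3⟩ := ih res.1 res.2 n1 hrange' hss' hsound' ha' hclose' hmeas
      rw [hstep]
      exact ⟨c1, fun x hx => c2 x ((n2 x).mpr (Or.inl hx)), c3⟩

theorem reachLoop_full (adj : List (List Int)) (n : Nat)
    (hadj : ∀ (w : Nat) (u : Int), u ∈ adj.getD w [] → 0 ≤ u ∧ u.toNat < n)
    (a : Int) (ha0 : 0 ≤ a) (han : a.toNat < n) :
    ∀ x : Int, x ∈ reachLoop adj (n + 1) (PySem.Set.ofList [a], [a]) ↔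
      Relation.ReflTransGen (RelG adj) a x := by
  have hset : PySem.Set.ofList [a] = [a] := rfl
  obtain ⟨c1, c2, c3⟩ := reachLoop_spec adj n hadj a (n + 1) (PySem.Set.ofList [a]) [a]
    (by rw [hset]; simp)
    (by rw [hset]; intro x hx; simp at hx; subst hx; exact ⟨ha0, han⟩)
    (by rw [hset]; intro x hx; exact hx)
    (by rw [hset]; intro x hx; simp at hx; subst hx; exact Relation.ReflTransGen.refl)
    (by rw [hset]; simp)
    (by intro x hx; rw [hset] at hx; simp at hx; subst hx; left; simp)
    (by rw [hset]; simp; omega)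
  intro x
  constructor
  · exact fun hx => (c1 x hx).1
  · intro hrt
    induction hrt with
    | refl => exact c2 a (by rw [hset]; simp)
    | tail h1 h2 ih2 => exact c3 _ ih2 _ h2

theorem indeg_spec (reach : PySem.Set Int) (E : List (Int × Int)) (b : Int) :
    ∀ d : PySem.Dict Int Int,
    (E.foldl (fun d e =>
        if PySem.Set.contains reach e.1 = true then
          PySem.Dict.insert d e.2 (PySem.Dict.getD d e.2 0 + 1) else d) d).getD b 0 =
      d.getD b 0 + (E.countP (fun e => decide (e.1 ∈ reach) && decide (e.2 = b)) : Int) := by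
  induction E with
  | nil => intro d; simp
  | cons e E ih =>
    intro d
    rw [List.foldl_cons]
    by_cases hc : e.1 ∈ reach
    · have hct : PySem.Set.contains reach e.1 = true := (PySem.Set.contains_iff _ _).mpr hc
      rw [if_pos hct, ih]
      rw [PySem.Dict.getD_insert]
      by_cases hb : b = e.2
      · rw [if_pos hb, List.countP_cons]
        subst hb
        simp [hc]
        push_cast
        ring
      · rw [if_neg hb, List.countP_cons]
        have : ¬ (e.2 = b) := fun hcon => hb hcon.symm
        simp [this]
    · have hcf : PySem.Set.contains reach e.1 = false := by
        cases h1 : PySem.Set.contains reach e.1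
        · rfl
        · exact absurd ((PySem.Set.contains_iff _ _).mp h1) hc
      rw [if_neg (by simp only [PySem.Set.contains_iff]; exact hc), ih, List.countP_cons]
      have hff : (decide (e.1 ∈ reach) && decide (e.2 = b)) = false := by simp [hc]
      rw [hff]
      simp

theorem count_map_snd (b : Int) : ∀ (l : List (Int × Int)),
    (l.map (·.2)).count b = l.countP (fun e => decide (e.2 = b)) := by
  intro l
  induction l with
  | nil => simp
  | cons e l ih =>
    simp only [List.map_cons, List.count_cons, List.countP_cons, ih, beq_iff_eq]
    by_cases h : e.2 = b <;> simp [h]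

theorem sum_countP (n : Nat) (E : List (Int × Int)) (b : Int) :
    ∀ (p : Nat → Bool) (q : Int → Bool),
    (∀ e ∈ E, 0 ≤ e.1 ∧ e.1.toNat < n) →
    (∀ w : Nat, w < n → p w = q ((w : Nat) : Int)) →
    (∑ w ∈ Finset.range n,
        (if p w = true then ((E.countP (fun e => decide (e.1 = (w : Int)) && decide (e.2 = b)) : Nat) : Int) else 0))
      = (E.countP (fun e => q e.1 && decide (e.2 = b)) : Int) := by
  induction E with
  | nil => intro p q _ _; simp
  | cons e E ih =>
    intro p q hE hpq
    have hE' : ∀ e' ∈ E, 0 ≤ e'.1 ∧ e'.1.toNat < n := fun e' he' => hE e' (by simp [he'])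
    obtain ⟨he0, hen⟩ := hE e (by simp)
    have key : (∑ w ∈ Finset.range n,
          (if p w = true then ((List.countP (fun e' => decide (e'.1 = (w : Int)) && decide (e'.2 = b)) (e :: E) : Nat) : Int) else 0))
        = (∑ w ∈ Finset.range n,
            (if p w = true then ((List.countP (fun e' => decide (e'.1 = (w : Int)) && decide (e'.2 = b)) E : Nat) : Int) else 0))
          + (∑ w ∈ Finset.range n, (if p w = true ∧ e.1 = (w : Int) ∧ e.2 = b then (1 : Int) else 0)) := by
      rw [← Finset.sum_add_distrib]
      apply Finset.sum_congr rfl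
      intro w _
      rw [List.countP_cons]
      by_cases hp : p w = true
      · rw [if_pos hp, if_pos hp]
        by_cases hee : e.1 = (w : Int) ∧ e.2 = b
        · have ht : (decide (e.1 = (w : Int)) && decide (e.2 = b)) = true := by
            simp [hee.1, hee.2]
          rw [ht, if_pos (⟨hp, hee⟩ : p w = true ∧ e.1 = (w : Int) ∧ e.2 = b)]
          norm_num
        · have hf : (decide (e.1 = (w : Int)) && decide (e.2 = b)) = false := by
            rw [← Bool.not_eq_true]
            simp only [Bool.and_eq_true, decide_eq_true_eq]
            exact hee
          rw [hf, if_neg ((fun hcon => hee hcon.2) : ¬ (p w = true ∧ e.1 = (w : Int) ∧ e.2 = b))]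
          simp
      · rw [if_neg hp, if_neg hp,
          if_neg ((fun hcon => hp hcon.1) : ¬ (p w = true ∧ e.1 = (w : Int) ∧ e.2 = b))]
        simp
    rw [key, ih p q hE' hpq, List.countP_cons]
    have hone : (∑ w ∈ Finset.range n, (if p w = true ∧ e.1 = (w : Int) ∧ e.2 = b then (1 : Int) else 0))
        = (if (q e.1 && decide (e.2 = b)) = true then (1 : Int) else 0) := by
      by_cases hqb : (q e.1 && decide (e.2 = b)) = true
      · obtain ⟨hq, hb2⟩ := Bool.and_eq_true_iff.mp hqb
        have hb2' : e.2 = b := by simpa using hb2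
        rw [if_pos hqb, Finset.sum_eq_single e.1.toNat]
        · have hcast : ((e.1.toNat : Nat) : Int) = e.1 := Int.toNat_of_nonneg he0
          rw [if_pos ⟨by rw [hpq e.1.toNat hen, hcast]; exact hq, by omega, hb2'⟩]
        · intro w _ hw
          exact if_neg (fun hcon => hw (by omega))
        · intro hcon
          exact absurd (Finset.mem_range.mpr hen) hcon
      · rw [if_neg hqb]
        apply Finset.sum_eq_zero
        intro w hw
        apply if_neg
        rintro ⟨hpw, he1, hb2⟩
        apply hqb
        rw [hpq w (Finset.mem_range.mp hw)] at hpw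
        rw [← he1] at hpw
        simp [hpw, hb2]
    rw [hone]
    push_cast
    ring

theorem inner_eq (V : Int) (E : List (Int × Int)) (hE : Pre_critical V E)
    (a : Int) (ha : 0 ≤ a ∧ a < V) (c : Int) :
    (let graph := constructGraph V E
     let st := dfsA graph V.toNat a (List.replicate V.toNat false, List.replicate V.toNat (0 : Int))
     (PySem.List.pyGetD graph a []).foldl (fun counter b =>
       if PySem.List.pyGetD st.1 b false = true ∧ PySem.List.pyGetD st.2 b 0 = 1 then counter + 1
       else counter) c) =
    (let adj := constructGraph V E
     let reach := reachLoop adj (V.toNat + 1) (PySem.Set.ofList [a], [a])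
     let indeg := E.foldl (fun d e =>
        if PySem.Set.contains reach e.1 = true then
          PySem.Dict.insert d e.2 (PySem.Dict.getD d e.2 0 + 1) else d)
       (PySem.Dict.empty : PySem.Dict Int Int)
     (PySem.List.pyGetD adj a []).foldl (fun total b =>
       if PySem.Dict.getD indeg b 0 = 1 then total + 1 else total) c) := by
  obtain ⟨ha0, haV⟩ := ha
  have han : a.toNat < V.toNat := by omega
  have hG := cg_range V E hE
  obtain ⟨hviz, hpc⟩ := dfsA_full (constructGraph V E) V.toNat hG a ha0 han
  have hR := reachLoop_full (constructGraph V E) V.toNat hG a ha0 han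
  show (PySem.List.pyGetD (constructGraph V E) a []).foldl _ c
      = (PySem.List.pyGetD (constructGraph V E) a []).foldl _ c
  rw [pyGetD_int _ _ _ ha0]
  apply foldl_eq_of_agree
  intro c' b hb
  obtain ⟨hb0, hbn⟩ := hG a.toNat b hb
  have hcastb : ((b.toNat : Nat) : Int) = b := Int.toNat_of_nonneg hb0
  have hrtb : Relation.ReflTransGen (RelG (constructGraph V E)) a b :=
    Relation.ReflTransGen.single (show RelG (constructGraph V E) a b from hb)
  have hvisb : (dfsA (constructGraph V E) V.toNat a
      (List.replicate V.toNat false, List.replicate V.toNat (0 : Int))).1.getD b.toNat false = true :=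
    (hviz b.toNat).mpr ⟨hbn, by rw [hcastb]; exact hrtb⟩
  have hval : (dfsA (constructGraph V E) V.toNat a
        (List.replicate V.toNat false, List.replicate V.toNat (0 : Int))).2.getD b.toNat 0
      = PySem.Dict.getD (E.foldl (fun d e =>
          if PySem.Set.contains (reachLoop (constructGraph V E) (V.toNat + 1) (PySem.Set.ofList [a], [a])) e.1 = true then
            PySem.Dict.insert d e.2 (PySem.Dict.getD d e.2 0 + 1) else d)
          (PySem.Dict.empty : PySem.Dict Int Int)) b 0 := by
    rw [hpc b.toNat hbn, indeg_spec _ E b PySem.Dict.empty, PySem.Dict.getD_empty, zero_add]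
    have hcount : ∀ w : Nat, (((constructGraph V E).getD w []).count ((b.toNat : Nat) : Int) : Int)
        = ((E.countP (fun e => decide (e.1 = (w : Int)) && decide (e.2 = b)) : Nat) : Int) := by
      intro w
      rw [(cg_spec V E hE).2 w, hcastb, count_map_snd, List.countP_filter]
      congr 1
      apply List.countP_congr
      intro e _
      rw [Bool.and_comm]
    have hsum : (∑ w ∈ Finset.range V.toNat,
          (if (dfsA (constructGraph V E) V.toNat a
              (List.replicate V.toNat false, List.replicate V.toNat (0 : Int))).1.getD w false = true
           then (((constructGraph V E).getD w []).count ((b.toNat : Nat) : Int) : Int) else 0))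
        = (∑ w ∈ Finset.range V.toNat,
          (if (dfsA (constructGraph V E) V.toNat a
              (List.replicate V.toNat false, List.replicate V.toNat (0 : Int))).1.getD w false = true
           then ((E.countP (fun e => decide (e.1 = (w : Int)) && decide (e.2 = b)) : Nat) : Int) else 0)) := by
      apply Finset.sum_congr rfl
      intro w _
      rw [hcount w]
    rw [hsum]
    refine sum_countP V.toNat E b
      (fun w => (dfsA (constructGraph V E) V.toNat a
        (List.replicate V.toNat false, List.replicate V.toNat (0 : Int))).1.getD w false)
      (fun x => decide (x ∈ reachLoop (constructGraph V E) (V.toNat + 1) (PySem.Set.ofList [a], [a])))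
      (fun e he => ⟨(hE e he).1, by have := (hE e he).2.1; omega⟩) ?_
    intro w hwn
    beta_reduce
    by_cases hm : ((w : Nat) : Int) ∈ reachLoop (constructGraph V E) (V.toNat + 1) (PySem.Set.ofList [a], [a])
    · have hrt := (hR _).mp hm
      have hv : (dfsA (constructGraph V E) V.toNat a
          (List.replicate V.toNat false, List.replicate V.toNat (0 : Int))).1.getD w false = true :=
        (hviz w).mpr ⟨hwn, hrt⟩
      rw [hv]
      simp [hm]
    · have hnrt : ¬ Relation.ReflTransGen (RelG (constructGraph V E)) a ((w : Nat) : Int) :=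
        fun h => hm ((hR _).mpr h)
      have hv : (dfsA (constructGraph V E) V.toNat a
          (List.replicate V.toNat false, List.replicate V.toNat (0 : Int))).1.getD w false = false := by
        cases hvv : (dfsA (constructGraph V E) V.toNat a
            (List.replicate V.toNat false, List.replicate V.toNat (0 : Int))).1.getD w false
        · rfl
        · exact absurd ((hviz w).mp hvv).2 hnrt
      rw [hv]
      simp [hm]
  apply if_congr _ rfl rfl
  rw [pyGetD_int _ _ _ hb0, pyGetD_int _ _ _ hb0]
  rw [hvisb, hval]
  simp

-- ===== VERDICT (by name: the statement is the Claim_ definition above) =====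
theorem critical_spec : Claim_equal_critical := by
  intro V E _hD hE
  unfold Spec_critical critical critical_alt
  exact foldl_eq_of_agree _ _ _
    (fun c a ha => inner_eq V E hE a ((PySem.List.mem_pyRange_one).mp ha) c) 0
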